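-- pv_equiv track=rewrite | github.com/mouredev/roadmap-retos-programacion | Roadmap/39 - BATMAN DAY/python/mouredev.py | batcave_security_system
-- ===== SOURCE A (Python) =====
-- def sum_subgrid_alerts(sensors, center_x, center_y) -> int:
--
--     total = 0
--
--     for x in range(center_x - 1, center_x + 2):
--         for y in range(center_y - 1, center_y + 2):
--             for sensor in sensors:
--                 if sensor[0] == x and sensor[1] == y:
--                     total += sensor[2]
--
--     return total
--
-- def batcave_security_system(sensors):
--
--     max_alert_level = 0
--     max_alert_coordinate = (0, 0)
--
--     for x in range(1, 19):
--         for y in range(1, 19):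
--             alert_level = sum_subgrid_alerts(sensors, x, y)
--             if alert_level > max_alert_level:
--                 max_alert_level = alert_level
--                 max_alert_coordinate = (x, y)
--
--     distance = abs(max_alert_coordinate[0]) + abs(max_alert_coordinate[1])
--     activate_protocol = max_alert_level > 20
--
--     return max_alert_coordinate, max_alert_level, distance, activate_protocol
-- ===== SOURCE B (Python) =====
-- def batcave_security_system(sensors):
--     # Index per-cell alert totals once, then each 3x3 window is 9 O(1) lookups.
--     cell = {}
--     for s in sensors:
--         x = s[0]
--         if 0 <= x < 20:
--             y = s[1]
--             if 0 <= y < 20: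
--                 cell[(x, y)] = cell.get((x, y), 0) + s[2]
--
--     best_level = 0
--     best_coord = (0, 0)
--     for cx in range(1, 19):
--         for cy in range(1, 19):
--             level = sum(cell.get((cx + dx, cy + dy), 0)
--                         for dx in (-1, 0, 1) for dy in (-1, 0, 1))
--             if level > best_level:
--                 best_level = level
--                 best_coord = (cx, cy)
--
--     distance = abs(best_coord[0]) + abs(best_coord[1])
--     return best_coord, best_level, distance, best_level > 20
-- ===== Notes on version B (the rewrite author's own statement) =====
-- stated objective: faster
-- what changed: B builds a per-cell alert-total dictionary in one pass over the sensors, so each of the 324 window evaluations is 9 O(1) lookups instead of A's rescans of the whole sensor list for every cell of every window.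
import Mathlib
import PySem

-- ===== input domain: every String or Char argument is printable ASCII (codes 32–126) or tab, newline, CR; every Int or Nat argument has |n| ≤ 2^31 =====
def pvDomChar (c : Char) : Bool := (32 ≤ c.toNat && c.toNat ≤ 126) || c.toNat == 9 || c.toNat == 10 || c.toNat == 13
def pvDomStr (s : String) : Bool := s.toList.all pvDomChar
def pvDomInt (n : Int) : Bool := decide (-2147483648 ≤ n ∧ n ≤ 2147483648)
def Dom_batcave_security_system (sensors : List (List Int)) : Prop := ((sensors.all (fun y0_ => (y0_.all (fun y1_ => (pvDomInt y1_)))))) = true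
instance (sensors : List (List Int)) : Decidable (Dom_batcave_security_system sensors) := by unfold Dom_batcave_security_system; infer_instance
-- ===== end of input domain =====

-- B replaces A's rescans of the whole sensor list (for every cell of every 3x3 window) by a
-- per-cell total dictionary built in one pass; each window is then 9 O(1) lookups (objective: faster).

-- ===== PORT A =====
-- sensor[i] with the index known in range on Pre_; the .getD 0 default is never reached there
def pvGetD (s : List Int) (i : Int) : Int := (PySem.List.pyGet? s i).getD 0

def sum_subgrid_alerts (sensors : List (List Int)) (center_x center_y : Int) : Int :=
  (PySem.List.pyRange (center_x - 1) (center_x + 2) 1).foldl (fun t1 x =>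
    (PySem.List.pyRange (center_y - 1) (center_y + 2) 1).foldl (fun t2 y =>
      sensors.foldl (fun total sensor =>
        if pvGetD sensor 0 = x ∧ pvGetD sensor 1 = y then total + pvGetD sensor 2
        else total) t2) t1) 0

def batcave_security_system (sensors : List (List Int)) : (Int × Int) × Int × Int × Bool :=
  let st := (PySem.List.pyRange 1 19 1).foldl (fun st x =>
      (PySem.List.pyRange 1 19 1).foldl (fun st y =>
        let alert_level := sum_subgrid_alerts sensors x y
        if alert_level > st.1 then (alert_level, (x, y)) else st) st)
    ((0 : Int), ((0 : Int), (0 : Int)))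
  (st.2, st.1, |st.2.1| + |st.2.2|, decide (st.1 > 20))

-- ===== PORT B =====
-- one pass over the sensors: per-cell alert totals, keyed by coordinate
def pvCellIndex (sensors : List (List Int)) : PySem.Dict (Int × Int) Int :=
  sensors.foldl (fun d s =>
    let x := pvGetD s 0
    if 0 ≤ x ∧ x < 20 then
      let y := pvGetD s 1
      if 0 ≤ y ∧ y < 20 then d.insert (x, y) (d.getD (x, y) 0 + pvGetD s 2) else d
    else d) PySem.Dict.empty

-- sum(cell.get((cx+dx, cy+dy), 0) for dx in (-1,0,1) for dy in (-1,0,1))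
def pvWindow (cell : PySem.Dict (Int × Int) Int) (cx cy : Int) : Int :=
  ([-1, 0, 1] : List Int).foldl (fun t dx =>
    ([-1, 0, 1] : List Int).foldl (fun t dy => t + cell.getD (cx + dx, cy + dy) 0) t) 0

def batcave_security_system_alt (sensors : List (List Int)) : (Int × Int) × Int × Int × Bool :=
  let cell := pvCellIndex sensors
  let st := (PySem.List.pyRange 1 19 1).foldl (fun st cx =>
      (PySem.List.pyRange 1 19 1).foldl (fun st cy =>
        let level := pvWindow cell cx cy
        if level > st.1 then (level, (cx, cy)) else st) st)
    ((0 : Int), ((0 : Int), (0 : Int)))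
  (st.2, st.1, |st.2.1| + |st.2.2|, decide (st.1 > 20))

-- ===== PRECONDITION & SPEC =====
-- Pre_ excludes exactly the inputs on which Python A raises IndexError: a sensor shorter than the
-- prefix of entries A actually reads (entry 1 is read only when entry 0 is a queried x in 0..19,
-- entry 2 only when entry 1 is also a queried y in 0..19).
def Pre_batcave_security_system (sensors : List (List Int)) : Prop :=
  ∀ s ∈ sensors, 1 ≤ s.length ∧
    ((0 ≤ s.getD 0 0 ∧ s.getD 0 0 < 20) → 2 ≤ s.length ∧
      ((0 ≤ s.getD 1 0 ∧ s.getD 1 0 < 20) → 3 ≤ s.length))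
instance (sensors : List (List Int)) : Decidable (Pre_batcave_security_system sensors) := by
  unfold Pre_batcave_security_system; infer_instance

def pvWitness_batcave_security_system : List (List Int) := [[1, 1, 25], [25], [3, 40], [2, 2, -4, 9]]

def Spec_batcave_security_system (sensors : List (List Int)) (out : (Int × Int) × Int × Int × Bool) : Prop := out = batcave_security_system_alt sensors
instance (sensors : List (List Int)) (out : (Int × Int) × Int × Int × Bool) : Decidable (Spec_batcave_security_system sensors out) := by unfold Spec_batcave_security_system; infer_instance

-- ===== CLAIM (what is proved, stated in full; the proofs are below) =====
def Claim_equal_batcave_security_system : Prop := ∀ (sensors : List (List Int)), Dom_batcave_security_system sensors → Pre_batcave_security_system sensors → Spec_batcave_security_system sensors (batcave_security_system sensors)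

-- ===== LEMMAS AND PROOFS =====

-- A's per-cell sensor scan computes exactly the dictionary entry B indexes (for in-grid cells).
theorem pv_scan_eq_cell (i j : Int) (hi : 0 ≤ i ∧ i < 20) (hj : 0 ≤ j ∧ j < 20) :
    ∀ (l : List (List Int)) (d : PySem.Dict (Int × Int) Int) (t : Int),
      l.foldl (fun total sensor =>
          if pvGetD sensor 0 = i ∧ pvGetD sensor 1 = j then total + pvGetD sensor 2
          else total) t
        = t + ((l.foldl (fun d s =>
              let x := pvGetD s 0
              if 0 ≤ x ∧ x < 20 then
                let y := pvGetD s 1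
                if 0 ≤ y ∧ y < 20 then d.insert (x, y) (d.getD (x, y) 0 + pvGetD s 2) else d
              else d) d).getD (i, j) 0 - d.getD (i, j) 0) := by
  intro l
  induction l with
  | nil => intro d t; simp
  | cons s l ih =>
    intro d t
    simp only [List.foldl_cons]
    by_cases hm : pvGetD s 0 = i ∧ pvGetD s 1 = j
    · obtain ⟨hm1, hm2⟩ := hm
      have h0 : 0 ≤ pvGetD s 0 ∧ pvGetD s 0 < 20 := by obtain ⟨a, b⟩ := hi; constructor <;> omega
      have h1 : 0 ≤ pvGetD s 1 ∧ pvGetD s 1 < 20 := by obtain ⟨a, b⟩ := hj; constructor <;> omega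
      rw [if_pos ⟨hm1, hm2⟩, if_pos h0, if_pos h1, hm1, hm2,
          ih (d.insert (i, j) (d.getD (i, j) 0 + pvGetD s 2)) (t + pvGetD s 2),
          PySem.Dict.getD_insert_self]
      ring
    · rw [if_neg hm]
      by_cases h0 : 0 ≤ pvGetD s 0 ∧ pvGetD s 0 < 20
      · by_cases h1 : 0 ≤ pvGetD s 1 ∧ pvGetD s 1 < 20
        · have hne : (i, j) ≠ (pvGetD s 0, pvGetD s 1) := by
            intro he
            exact hm ⟨(congrArg Prod.fst he).symm, (congrArg Prod.snd he).symm⟩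
          rw [if_pos h0, if_pos h1,
              ih (d.insert (pvGetD s 0, pvGetD s 1)
                    (d.getD (pvGetD s 0, pvGetD s 1) 0 + pvGetD s 2)) t,
              PySem.Dict.getD_insert_of_ne d _ _ hne]
        · rw [if_pos h0, if_neg h1]
          exact ih d t
      · rw [if_neg h0]
        exact ih d t

-- the scan lemma specialised to B's dictionary (built from the empty dict)
theorem pv_scan_eq_cellIndex (i j : Int) (hi : 0 ≤ i ∧ i < 20) (hj : 0 ≤ j ∧ j < 20)
    (sensors : List (List Int)) (t : Int) :
    sensors.foldl (fun total sensor =>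
        if pvGetD sensor 0 = i ∧ pvGetD sensor 1 = j then total + pvGetD sensor 2
        else total) t
      = t + (pvCellIndex sensors).getD (i, j) 0 := by
  have h := pv_scan_eq_cell i j hi hj sensors PySem.Dict.empty t
  rw [PySem.Dict.getD_empty] at h
  rw [h, pvCellIndex]
  ring

-- A's 3x3 rescan sum equals B's 9 dictionary lookups, for any in-sweep center.
theorem pv_subgrid_eq_window (sensors : List (List Int)) (cx cy : Int)
    (hx : 1 ≤ cx ∧ cx < 19) (hy : 1 ≤ cy ∧ cy < 19) :
    sum_subgrid_alerts sensors cx cy = pvWindow (pvCellIndex sensors) cx cy := by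
  have hrx : PySem.List.pyRange (cx - 1) (cx + 2) 1 = [cx - 1, cx, cx + 1] := by
    rw [PySem.List.pyRange_one_cons (by omega), PySem.List.pyRange_one_cons (by omega),
        PySem.List.pyRange_one_cons (by omega), PySem.List.pyRange_one_eq_nil (by omega)]
    norm_num
  have hry : PySem.List.pyRange (cy - 1) (cy + 2) 1 = [cy - 1, cy, cy + 1] := by
    rw [PySem.List.pyRange_one_cons (by omega), PySem.List.pyRange_one_cons (by omega),
        PySem.List.pyRange_one_cons (by omega), PySem.List.pyRange_one_eq_nil (by omega)]
    norm_num
  unfold sum_subgrid_alerts pvWindow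
  rw [hrx, hry]
  simp only [List.foldl_cons, List.foldl_nil]
  rw [pv_scan_eq_cellIndex (cx - 1) (cy - 1) (by omega) (by omega),
      pv_scan_eq_cellIndex (cx - 1) cy (by omega) (by omega),
      pv_scan_eq_cellIndex (cx - 1) (cy + 1) (by omega) (by omega),
      pv_scan_eq_cellIndex cx (cy - 1) (by omega) (by omega),
      pv_scan_eq_cellIndex cx cy (by omega) (by omega),
      pv_scan_eq_cellIndex cx (cy + 1) (by omega) (by omega),
      pv_scan_eq_cellIndex (cx + 1) (cy - 1) (by omega) (by omega),
      pv_scan_eq_cellIndex (cx + 1) cy (by omega) (by omega),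
      pv_scan_eq_cellIndex (cx + 1) (cy + 1) (by omega) (by omega)]
  ring_nf

-- ===== VERDICT (by name: the statement is the Claim_ definition above) =====
theorem batcave_security_system_spec : Claim_equal_batcave_security_system := by
  intro sensors _ _
  unfold Spec_batcave_security_system batcave_security_system batcave_security_system_alt
  have hsweep :
      (PySem.List.pyRange 1 19 1).foldl (fun st x =>
        (PySem.List.pyRange 1 19 1).foldl (fun st y =>
          let alert_level := sum_subgrid_alerts sensors x y
          if alert_level > st.1 then (alert_level, (x, y)) else st) st)
        ((0 : Int), ((0 : Int), (0 : Int)))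
      = (PySem.List.pyRange 1 19 1).foldl (fun st cx =>
        (PySem.List.pyRange 1 19 1).foldl (fun st cy =>
          let level := pvWindow (pvCellIndex sensors) cx cy
          if level > st.1 then (level, (cx, cy)) else st) st)
        ((0 : Int), ((0 : Int), (0 : Int))) := by
    apply PySem.List.foldl_congr_mem
    intro st x hxmem
    apply PySem.List.foldl_congr_mem
    intro st y hymem
    rw [PySem.List.mem_pyRange_one] at hxmem hymem
    simp only [pv_subgrid_eq_window sensors x y ⟨hxmem.1, hxmem.2⟩ ⟨hymem.1, hymem.2⟩]
  simp only [hsweep]
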